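-- pv_equiv track=rewrite | github.com/grantaj/astrolabe | astrolabe/solver/astap.py | _summarize_astap_failure
-- ===== SOURCE A (Python) =====
-- def _summarize_astap_failure(stdout: str, stderr: str) -> str:
--     text = stdout.strip() or stderr.strip()
--     if not text:
--         return "Unknown error"
--     lines = [line.strip() for line in text.splitlines() if line.strip()]
--     priority = [
--         "Only 0 stars found",
--         "No solution found",
--         "Old database",
--         "not enough stars",
--         "Error",
--     ]
--     for p in priority:
--         for line in lines:
--             if p in line:
--                 return line
--     return lines[-1]
-- ===== SOURCE B (Python) =====
-- def _summarize_astap_failure(stdout: str, stderr: str) -> str: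
--     text = stdout.strip() or stderr.strip()
--     if not text:
--         return "Unknown error"
--     lines = [l for l in map(str.strip, text.splitlines()) if l]
--     priority = [
--         "Only 0 stars found",
--         "No solution found",
--         "Old database",
--         "not enough stars",
--         "Error",
--     ]
--     best_rank = len(priority)
--     best_line = ""
--     for line in lines:
--         rank = 0
--         for p in priority:
--             if p in line:
--                 break
--             rank += 1
--         if rank < best_rank:
--             best_rank = rank
--             best_line = line
--     if best_rank < len(priority):
--         return best_line
--     return lines[-1]
-- ===== Notes on version B (the rewrite author's own statement) =====
-- stated objective: alternative
-- what changed: Replaces A's nested priority-then-lines rescans by a single argmin pass over the lines: each line's rank is the index of the first priority pattern it contains, and the earliest line with the strictly smallest rank wins.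
import Mathlib
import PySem

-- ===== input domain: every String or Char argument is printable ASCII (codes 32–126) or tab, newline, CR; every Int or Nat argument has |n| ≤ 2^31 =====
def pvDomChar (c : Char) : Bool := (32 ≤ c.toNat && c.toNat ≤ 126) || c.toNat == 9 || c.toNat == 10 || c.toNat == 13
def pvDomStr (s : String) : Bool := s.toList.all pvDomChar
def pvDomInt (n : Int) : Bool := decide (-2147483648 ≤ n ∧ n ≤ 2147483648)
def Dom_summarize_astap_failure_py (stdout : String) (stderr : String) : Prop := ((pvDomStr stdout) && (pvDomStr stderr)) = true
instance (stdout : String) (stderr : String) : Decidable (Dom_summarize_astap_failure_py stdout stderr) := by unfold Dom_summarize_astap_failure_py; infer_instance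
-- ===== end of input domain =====

-- B replaces A's nested priority-then-lines scans by a single argmin pass over the lines
-- (each line's rank = index of first matching priority pattern); same return value, different decomposition.

def pvPriority : List String :=
  ["Only 0 stars found", "No solution found", "Old database", "not enough stars", "Error"]

-- ===== PORT A =====
-- inner loop: 'for line in lines: if p in line: return line'
def pvAInner (p : String) (lines : List String) : Option String :=
  match lines with
  | [] => none
  | l :: rest => if PySem.Str.isIn p l then some l else pvAInner p rest

-- outer loop: 'for p in priority: …'
def pvALoop (ps : List String) (lines : List String) : Option String :=
  match ps with
  | [] => none
  | p :: rest =>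
    match pvAInner p lines with
    | some l => some l
    | none => pvALoop rest lines

def summarize_astap_failure_py (stdout : String) (stderr : String) : String :=
  let text := if PySem.Str.strip stdout = "" then PySem.Str.strip stderr else PySem.Str.strip stdout
  if text = "" then "Unknown error"
  else
    let lines := (PySem.Str.splitlines text).filterMap
      (fun line => if PySem.Str.strip line = "" then none else some (PySem.Str.strip line))
    match pvALoop pvPriority lines with
    | some l => l
    | none => (PySem.List.pyGet? lines (-1)).getD ""   -- lines[-1]; lines is never [] here

-- ===== PORT B =====
-- rank of a line = index of the first priority pattern it contains, else len(priority)
def pvRank (ps : List String) (l : String) : Nat :=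
  match ps with
  | [] => 0
  | p :: rest => if PySem.Str.isIn p l then 0 else pvRank rest l + 1

-- one update of (best_rank, best_line)
def pvBStep (ps : List String) (acc : Nat × String) (l : String) : Nat × String :=
  if pvRank ps l < acc.1 then (pvRank ps l, l) else acc

def summarize_astap_failure_py_alt (stdout : String) (stderr : String) : String :=
  let text := if PySem.Str.strip stdout = "" then PySem.Str.strip stderr else PySem.Str.strip stdout
  if text = "" then "Unknown error"
  else
    let lines := ((PySem.Str.splitlines text).map PySem.Str.strip).filter (fun l => l != "")
    let best := lines.foldl (pvBStep pvPriority) (pvPriority.length, "")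
    if best.1 < pvPriority.length then best.2
    else (PySem.List.pyGet? lines (-1)).getD ""   -- lines[-1]; lines is never [] here

-- ===== PRECONDITION & SPEC =====
def Spec_summarize_astap_failure_py (stdout : String) (stderr : String) (out : String) : Prop := out = summarize_astap_failure_py_alt stdout stderr
instance (stdout : String) (stderr : String) (out : String) : Decidable (Spec_summarize_astap_failure_py stdout stderr out) := by unfold Spec_summarize_astap_failure_py; infer_instance

-- ===== CLAIM (what is proved, stated in full; the proofs are below) =====
def Claim_equal_summarize_astap_failure_py : Prop := ∀ (stdout : String) (stderr : String), Dom_summarize_astap_failure_py stdout stderr → Spec_summarize_astap_failure_py stdout stderr (summarize_astap_failure_py stdout stderr)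

-- ===== LEMMAS AND PROOFS =====

-- once best_rank hits 0 the fold never changes the accumulator
lemma pv_fold_stuck (ps : List String) (lines : List String) (acc : Nat × String)
    (h : acc.1 = 0) : lines.foldl (pvBStep ps) acc = acc := by
  induction lines generalizing acc with
  | nil => rfl
  | cons l rest ih =>
    simp only [List.foldl_cons, pvBStep, h]
    simp only [Nat.not_lt_zero, if_false]
    exact ih acc h

-- if some line contains p, the fold over priorities p::rest lands on the first such line, with rank 0
lemma pv_fold_zero (p : String) (rest : List String) (lines : List String) (l0 : String)
    (acc : Nat × String) (hacc : 0 < acc.1) (hf : pvAInner p lines = some l0) :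
    lines.foldl (pvBStep (p :: rest)) acc = (0, l0) := by
  induction lines generalizing acc with
  | nil => simp [pvAInner] at hf
  | cons l tl ih =>
    simp only [pvAInner] at hf
    by_cases hin : PySem.Str.isIn p l
    · simp only [hin, if_true] at hf
      cases hf
      simp only [List.foldl_cons, pvBStep, pvRank, hin, if_true, hacc]
      exact pv_fold_stuck _ _ _ rfl
    · simp only [hin] at hf
      simp only [List.foldl_cons, pvBStep, pvRank]
      rw [if_neg hin]
      split
      · exact ih (pvRank rest l + 1, l) (Nat.succ_pos _) hf
      · exact ih acc hacc hf
  -- note: hin as Bool vs Prop handled below if needed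

-- if no line contains p, folding with p::rest is the fold with rest, shifted by one
lemma pv_fold_shift (p : String) (rest : List String) (lines : List String)
    (hf : pvAInner p lines = none) (acc : Nat × String) :
    lines.foldl (pvBStep (p :: rest)) (acc.1 + 1, acc.2) =
      ((lines.foldl (pvBStep rest) acc).1 + 1, (lines.foldl (pvBStep rest) acc).2) := by
  induction lines generalizing acc with
  | nil => rfl
  | cons l tl ih =>
    simp only [pvAInner] at hf
    by_cases hin : PySem.Str.isIn p l
    · rw [PySem.Str.isIn_eq] at hin
      simp [hin] at hf
    · simp only [hin] at hf
      simp only [List.foldl_cons, pvBStep, pvRank]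
      rw [if_neg hin]
      by_cases hlt : pvRank rest l < acc.1
      · rw [if_pos (by omega), if_pos hlt]
        exact ih hf (pvRank rest l, l)
      · rw [if_neg (by omega), if_neg hlt]
        exact ih hf acc

-- main bridge: A's nested loops = the argmin fold
lemma pv_key (ps : List String) (lines : List String) :
    pvALoop ps lines =
      (if (lines.foldl (pvBStep ps) (ps.length, "")).1 < ps.length
       then some (lines.foldl (pvBStep ps) (ps.length, "")).2 else none) := by
  induction ps with
  | nil =>
    simp only [List.length_nil]
    rw [pv_fold_stuck [] lines (0, "") rfl]
    simp [pvALoop]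
  | cons p rest ih =>
    simp only [pvALoop]
    cases hf : pvAInner p lines with
    | some l0 =>
      rw [pv_fold_zero p rest lines l0 ((p :: rest).length, "") (by simp) hf]
      simp
    | none =>
      have hs := pv_fold_shift p rest lines hf (rest.length, "")
      simp only [List.length_cons]
      rw [show (rest.length + 1, "") = ((rest.length : Nat) + 1, ((rest.length, ""):(Nat × String)).2) from rfl] at *
      rw [hs, ih]
      by_cases h : (lines.foldl (pvBStep rest) (rest.length, "")).1 < rest.length
      · rw [if_pos h, if_pos (by omega)]
      · rw [if_neg h, if_neg (by omega)]

-- B's map-then-filter line cleanup equals A's comprehension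
lemma pv_lines_eq (xs : List String) :
    ((xs.map PySem.Str.strip).filter (fun l => l != "")) =
      xs.filterMap (fun line => if PySem.Str.strip line = "" then none else some (PySem.Str.strip line)) := by
  induction xs with
  | nil => rfl
  | cons a tl ih =>
    simp only [List.map_cons, List.filter_cons, List.filterMap_cons]
    by_cases h : PySem.Str.strip a = ""
    · simp [h, ih]
    · simp [h, ih]

-- the common tail: A's match on the nested-loop result = B's if on the fold result
lemma pv_tail (lines : List String) :
    (match pvALoop pvPriority lines with
     | some l => l
     | none => (PySem.List.pyGet? lines (-1)).getD "") =
      (if (lines.foldl (pvBStep pvPriority) (pvPriority.length, "")).1 < pvPriority.length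
       then (lines.foldl (pvBStep pvPriority) (pvPriority.length, "")).2
       else (PySem.List.pyGet? lines (-1)).getD "") := by
  rw [pv_key]
  by_cases hb : (lines.foldl (pvBStep pvPriority) (pvPriority.length, "")).1 < pvPriority.length
  · rw [if_pos hb, if_pos hb]
  · rw [if_neg hb, if_neg hb]

-- ===== VERDICT (by name: the statement is the Claim_ definition above) =====
theorem summarize_astap_failure_py_spec : Claim_equal_summarize_astap_failure_py := by
  intro stdout stderr _
  unfold Spec_summarize_astap_failure_py summarize_astap_failure_py summarize_astap_failure_py_alt
  by_cases h : (if PySem.Str.strip stdout = "" then PySem.Str.strip stderr else PySem.Str.strip stdout) = ""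
  · simp [h]
  · simp only [if_neg h, pv_lines_eq, pv_tail]
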